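-- pv_equiv track=rewrite | github.com/4oc3p/python_intro | Test1_11.py | column_even_ascend_odd_descend
-- ===== SOURCE A (Python) =====
-- def check_even(a):
--     l = [x for x in range(len(a[0])) if x % 2 == 0]
--     return l
--
-- def column_even_ascend_odd_descend(a):
--     for i in range(len(a[0])):
--         l = []
--         for j in range(len(a)):
--             l.append(a[j][i])
--         if i in check_even(a):
--             l.sort(reverse=True)
--         else:
--             l.sort()
--         for j in range(len(a)):
--             a[j][i] = l[j]
--     return a
-- ===== SOURCE B (Python) =====
-- def column_even_ascend_odd_descend(a):
--     n = len(a)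
--     w = len(a[0])
--     # decorate: one flat list of (column, signed value, original row); even columns
--     # are negated so that a single ascending global sort orders every column,
--     # even ones descending; the row index makes the triples totally ordered.
--     flat = sorted((i, a[j][i] if i % 2 else -a[j][i], j)
--                   for i in range(w) for j in range(n))
--     # undecorate: after the sort, column i occupies positions i*n .. i*n+n-1,
--     # so position k lands in row k % n.
--     for k in range(len(flat)):
--         i, s, _ = flat[k]
--         a[k % n][i] = s if i % 2 else -s
--     return a
-- ===== Notes on version B (the rewrite author's own statement) =====
-- stated objective: alternative
-- what changed: Replaces A's per-column loop (extract column, sort it ascending or descending, write it back, repeated w times) by a single decorate-sort-undecorate pass: build one flat list of (column, signed value, row) triples with even columns negated, sort it ONCE globally by tuple order, and write every entry back by its position (column block i*n..i*n+n-1, row k%n).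
import Mathlib
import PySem

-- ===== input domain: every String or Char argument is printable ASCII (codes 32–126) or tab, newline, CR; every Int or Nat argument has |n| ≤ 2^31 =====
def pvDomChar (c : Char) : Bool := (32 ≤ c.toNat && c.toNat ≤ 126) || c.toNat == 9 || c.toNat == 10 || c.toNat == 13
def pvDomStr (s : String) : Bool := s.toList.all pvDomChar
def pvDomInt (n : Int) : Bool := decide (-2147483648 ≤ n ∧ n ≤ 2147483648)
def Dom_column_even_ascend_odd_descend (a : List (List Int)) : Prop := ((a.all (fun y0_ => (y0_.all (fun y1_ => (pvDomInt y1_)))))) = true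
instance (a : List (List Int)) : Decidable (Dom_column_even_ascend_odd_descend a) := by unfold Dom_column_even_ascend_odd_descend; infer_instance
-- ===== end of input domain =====

-- B replaces A's per-column extract/sort/writeback loop by ONE global sort of decorated
-- (column, signed value, row) triples followed by a positional writeback; equivalence is
-- about the RETURN value only — the Python A mutates its argument in place (B performs
-- the same final mutation).

-- ===== PORT A =====
def check_even_port (a : List (List Int)) : List Int :=
  (PySem.List.pyRange 0 ((PySem.List.pyGetD a 0 []).length : Int) 1).filter
    (fun x => decide (PySem.Int.mod x 2 = 0))

def column_even_ascend_odd_descend (a : List (List Int)) : List (List Int) :=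
  (PySem.List.pyRange 0 ((PySem.List.pyGetD a 0 []).length : Int) 1).foldl (fun m i =>
    let l := (PySem.List.pyRange 0 (m.length : Int) 1).foldl
      (fun l j => l ++ [PySem.List.pyGetD (PySem.List.pyGetD m j []) i 0]) []
    let l := if i ∈ check_even_port m then PySem.List.sorted l (fun x => x) true
             else PySem.List.sorted l (fun x => x) false
    (PySem.List.pyRange 0 (m.length : Int) 1).foldl
      (fun m' j => PySem.List.pySetD m' j
        (PySem.List.pySetD (PySem.List.pyGetD m' j []) i (PySem.List.pyGetD l j 0))) m) a

-- ===== PORT B =====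
-- Python compares equal-length int 3-tuples lexicographically; that comparison is ported
-- exactly as the lex order on Int ×ₗ (Int ×ₗ Int) used as the sort key.
def column_even_ascend_odd_descend_alt (a : List (List Int)) : List (List Int) :=
  let n := a.length
  let w := (PySem.List.pyGetD a 0 []).length
  let flat := PySem.List.sorted
      ((PySem.List.pyRange 0 (w : Int) 1).flatMap (fun i =>
        (PySem.List.pyRange 0 (n : Int) 1).map (fun j =>
          (i, if PySem.Int.mod i 2 ≠ 0
              then PySem.List.pyGetD (PySem.List.pyGetD a j []) i 0
              else -(PySem.List.pyGetD (PySem.List.pyGetD a j []) i 0), j))))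
      (fun t => toLex (t.1, toLex (t.2.1, t.2.2)))
  (PySem.List.pyRange 0 (flat.length : Int) 1).foldl (fun m k =>
    let t := PySem.List.pyGetD flat k ((0:Int), (0:Int), (0:Int))
    PySem.List.pySetD m (PySem.Int.mod k (n : Int))
      (PySem.List.pySetD (PySem.List.pyGetD m (PySem.Int.mod k (n : Int)) []) t.1
        (if PySem.Int.mod t.1 2 ≠ 0 then t.2.1 else -t.2.1))) a

-- ===== PRECONDITION & SPEC =====
-- Pre_ excludes exactly the inputs on which the Python A raises IndexError: the empty
-- matrix (a[0]) and ragged matrices with a row shorter than the first row (a[j][i]).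
def Pre_column_even_ascend_odd_descend (a : List (List Int)) : Prop :=
  a ≠ [] ∧ ∀ r ∈ a, (PySem.List.pyGetD a 0 []).length ≤ r.length
instance (a : List (List Int)) : Decidable (Pre_column_even_ascend_odd_descend a) := by
  unfold Pre_column_even_ascend_odd_descend; infer_instance

def pvWitness_column_even_ascend_odd_descend : List (List Int) := [[3, 1, 2], [0, 5, 4]]

def Spec_column_even_ascend_odd_descend (a : List (List Int)) (out : List (List Int)) : Prop := out = column_even_ascend_odd_descend_alt a
instance (a : List (List Int)) (out : List (List Int)) : Decidable (Spec_column_even_ascend_odd_descend a out) := by unfold Spec_column_even_ascend_odd_descend; infer_instance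

-- ===== CLAIM (what is proved, stated in full; the proofs are below) =====
def Claim_equal_column_even_ascend_odd_descend : Prop := ∀ (a : List (List Int)), Dom_column_even_ascend_odd_descend a → Pre_column_even_ascend_odd_descend a → Spec_column_even_ascend_odd_descend a (column_even_ascend_odd_descend a)

-- ===== LEMMAS AND PROOFS =====

-- fold over range(k) that sets each index from its own previous value (A-side shape)
def setFold {α : Type} (g : Nat → α → α) (d : α) (k : Nat) (m : List α) : List α :=
  (List.range k).foldl (fun m' j => m'.set j (g j (m'.getD j d))) m

theorem length_setFold {α : Type} (g : Nat → α → α) (d : α) (k : Nat) (m : List α) :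
    (setFold g d k m).length = m.length := by
  induction k generalizing m with
  | zero => simp [setFold]
  | succ k ih => simp [setFold, List.range_succ, List.foldl_append] at *; simp [ih]

theorem getElem?_setFold {α : Type} (g : Nat → α → α) (d : α) (k : Nat) (m : List α) :
    ∀ (j : Nat),
    (setFold g d k m)[j]? = if j < k ∧ j < m.length then some (g j (m.getD j d)) else m[j]? := by
  induction k generalizing m with
  | zero => simp [setFold]
  | succ k ih =>
    intro j
    have hstep : setFold g d (k+1) m = (setFold g d k m).set k (g k ((setFold g d k m).getD k d)) := by
      simp [setFold, List.range_succ, List.foldl_append]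
    have hlen := length_setFold g d k m
    have hD : (setFold g d k m).getD k d = m.getD k d := by
      rw [List.getD_eq_getElem?_getD, List.getD_eq_getElem?_getD, ih m k]
      simp
    rw [hstep, hD, List.getElem?_set, hlen, ih m j]
    by_cases hkj : k = j
    · subst hkj
      by_cases hk : k < m.length <;> simp [hk]
    · rw [if_neg hkj]
      have hiff : (j < k + 1 ∧ j < m.length) ↔ (j < k ∧ j < m.length) := by omega
      rw [if_congr hiff rfl rfl]

-- conversions: pyRange folds/maps to Nat-range folds/maps
theorem foldl_pyRange_nat {β : Type} (n : Nat) (f : β → Int → β) (init : β) :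
    (PySem.List.pyRange 0 (n:Int) 1).foldl f init
      = (List.range n).foldl (fun b (k : Nat) => f b (k:Int)) init := by
  rw [PySem.List.pyRange_one]
  simp only [Int.sub_zero, Int.toNat_natCast, List.foldl_map, zero_add]

theorem map_pyRange_nat {β : Type} (n : Nat) (f : Int → β) :
    (PySem.List.pyRange 0 (n:Int) 1).map f = (List.range n).map (fun k : Nat => f (k:Int)) := by
  rw [PySem.List.pyRange_one]
  simp only [Int.sub_zero, Int.toNat_natCast, List.map_map, zero_add]
  rfl

theorem flatMap_pyRange_nat {β : Type} (n : Nat) (f : Int → List β) :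
    (PySem.List.pyRange 0 (n:Int) 1).flatMap f
      = (List.range n).flatMap (fun k : Nat => f (k:Int)) := by
  rw [PySem.List.pyRange_one]
  simp only [Int.sub_zero, Int.toNat_natCast, List.flatMap_map, zero_add]

theorem foldl_append_range {β : Type} (n : Nat) (f : Nat → β) :
    (List.range n).foldl (fun l j => l ++ [f j]) ([] : List β) = (List.range n).map f := by
  simpa using PySem.List.foldl_append_singleton_eq_map f (List.range n) []

theorem decmod (k : Nat) : (decide (PySem.Int.mod (k:Int) 2 = 0)) = decide (k % 2 = 0) := by
  rw [decide_eq_decide]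
  rw [show ((2:Int) = ((2:Nat):Int)) by norm_num, PySem.Int.mod_natCast]
  exact_mod_cast Iff.rfl

-- the column of a at index i, read as both ports read it
def colOf (a : List (List Int)) (i : Nat) : List Int :=
  (List.range a.length).map (fun j => (a.getD j []).getD i 0)

def sortCol (a : List (List Int)) (i : Nat) : List Int :=
  PySem.List.sorted (colOf a i) (fun x => x) (decide (i % 2 = 0))

-- entry view of a matrix
def ent (m : List (List Int)) (j i : Nat) : Option Int := (m.getD j [])[i]?

theorem getD_eq_ent_getD (m : List (List Int)) (j i : Nat) :
    (m.getD j []).getD i 0 = (ent m j i).getD 0 := by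
  rw [ent, List.getD_eq_getElem?_getD]

-- ===== characterization of port A =====

-- the loop body of port A, verbatim
def stepA (m : List (List Int)) (i : Int) : List (List Int) :=
  let l := (PySem.List.pyRange 0 (m.length : Int) 1).foldl
    (fun l j => l ++ [PySem.List.pyGetD (PySem.List.pyGetD m j []) i 0]) []
  let l := if i ∈ check_even_port m then PySem.List.sorted l (fun x => x) true
           else PySem.List.sorted l (fun x => x) false
  (PySem.List.pyRange 0 (m.length : Int) 1).foldl
    (fun m' j => PySem.List.pySetD m' j
      (PySem.List.pySetD (PySem.List.pyGetD m' j []) i (PySem.List.pyGetD l j 0))) m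

theorem A_eq_foldl (a : List (List Int)) :
    column_even_ascend_odd_descend a
      = (List.range ((PySem.List.pyGetD a 0 []).length)).foldl (fun m (k : Nat) => stepA m (k:Int)) a :=
  foldl_pyRange_nat _ stepA a

-- one step of A, rewritten as a setFold over Nat indices
theorem stepA_eq (m : List (List Int)) (k : Nat) :
    stepA m (k:Int) =
      setFold (fun j row => row.set k
          ((if (k:Int) ∈ check_even_port m then
              PySem.List.sorted ((List.range m.length).map (fun j => (m.getD j []).getD k 0)) (fun x => x) true
            else
              PySem.List.sorted ((List.range m.length).map (fun j => (m.getD j []).getD k 0)) (fun x => x) false).getD j 0))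
        [] m.length m := by
  rw [stepA]
  rw [foldl_pyRange_nat, foldl_pyRange_nat]
  simp only [PySem.List.pyGetD_natCast, PySem.List.pySetD_natCast]
  rw [foldl_append_range]
  rfl

-- membership in check_even: for k < len(m[0]) it is exactly evenness
theorem mem_check_even (m : List (List Int)) (k : Nat) (hk : k < (m.getD 0 []).length) :
    ((k:Int) ∈ check_even_port m) ↔ k % 2 = 0 := by
  rw [check_even_port, List.mem_filter, PySem.List.pyGetD_zero, PySem.List.mem_pyRange_one]
  constructor
  · rintro ⟨-, h⟩
    rw [decmod] at h
    exact of_decide_eq_true h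
  · intro h
    exact ⟨⟨by positivity, by exact_mod_cast hk⟩, by rw [decmod]; exact decide_eq_true h⟩

-- the invariant of A's column loop
theorem A_invariant (a : List (List Int)) (hPre : Pre_column_even_ascend_odd_descend a)
    (k : Nat) (hk : k ≤ (a.getD 0 []).length) :
    (((List.range k).foldl (fun m (k' : Nat) => stepA m (k':Int)) a).length = a.length) ∧
    (∀ j : Nat, (((List.range k).foldl (fun m (k' : Nat) => stepA m (k':Int)) a).getD j []).length
        = (a.getD j []).length) ∧
    (∀ j < a.length, ∀ i : Nat,
      ent ((List.range k).foldl (fun m (k' : Nat) => stepA m (k':Int)) a) j i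
        = if i < k then some ((sortCol a i).getD j 0) else ent a j i) := by
  induction k with
  | zero => exact ⟨rfl, fun j => rfl, fun j hj i => by simp⟩
  | succ k ih =>
    obtain ⟨ihL, ihR, ihE⟩ := ih (by omega)
    set m := (List.range k).foldl (fun m (k' : Nat) => stepA m (k':Int)) a with hm
    have hstep : (List.range (k+1)).foldl (fun m (k' : Nat) => stepA m (k':Int)) a = stepA m (k:Int) := by
      rw [List.range_succ, List.foldl_append]; rfl
    have hkw : k < (a.getD 0 []).length := by omega
    -- the column read in step k is the original column k
    have hcol : (List.range m.length).map (fun j => (m.getD j []).getD k 0) = colOf a k := by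
      rw [ihL, colOf]
      refine List.map_congr_left ?_
      intro j hj
      rw [List.mem_range] at hj
      rw [getD_eq_ent_getD, getD_eq_ent_getD, ihE j hj k]
      rw [if_neg (by omega)]
    have hsorted :
        (if (k:Int) ∈ check_even_port m then PySem.List.sorted (colOf a k) (fun x => x) true
         else PySem.List.sorted (colOf a k) (fun x => x) false) = sortCol a k := by
      rw [sortCol]
      have hmem := mem_check_even m k (by rw [ihR 0]; exact hkw)
      by_cases hpar : k % 2 = 0
      · rw [if_pos (hmem.mpr hpar)]; simp [hpar]
      · rw [if_neg (fun h => hpar (hmem.mp h))]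
        simp [hpar]
    have hfin : (List.range (k+1)).foldl (fun m (k' : Nat) => stepA m (k':Int)) a
        = setFold (fun j row => row.set k ((sortCol a k).getD j 0)) [] m.length m := by
      rw [hstep, stepA_eq, hcol, hsorted]
    refine ⟨?_, ?_, ?_⟩
    · rw [hfin, length_setFold, ihL]
    · intro j
      rw [hfin, List.getD_eq_getElem?_getD, getElem?_setFold]
      by_cases hj : j < m.length
      · rw [if_pos ⟨by omega, hj⟩]
        simp only [Option.getD_some, List.length_set]
        exact ihR j
      · rw [if_neg (by omega), ← List.getD_eq_getElem?_getD, ihR j]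
    · intro j hj i
      rw [hfin, ent, List.getD_eq_getElem?_getD, getElem?_setFold]
      rw [if_pos ⟨by omega, by omega⟩]
      simp only [Option.getD_some]
      have hrl : (m.getD j []).length = (a.getD j []).length := ihR j
      have hw : (a.getD 0 []).length ≤ (a.getD j []).length := by
        have hja : a.getD j [] = a[j] := by
          rw [List.getD_eq_getElem?_getD, List.getElem?_eq_getElem hj]; rfl
        have := hPre.2 _ (hja ▸ List.getElem_mem hj)
        rwa [PySem.List.pyGetD_zero] at this
      rw [List.getElem?_set]
      by_cases hik : k = i
      · subst hik
        rw [if_pos rfl, if_pos (by omega : k < k + 1)]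
        rw [if_pos (by omega)]
      · rw [if_neg hik]
        have hE := ihE j hj i
        rw [ent] at hE
        rw [hE]
        have hiff : (i < k + 1) ↔ (i < k) := by omega
        rw [if_congr hiff rfl rfl]

-- A entry characterization
theorem A_ent (a : List (List Int)) (hPre : Pre_column_even_ascend_odd_descend a)
    (j : Nat) (hj : j < a.length) (i : Nat) :
    ent (column_even_ascend_odd_descend a) j i =
      if i < (a.getD 0 []).length then some ((sortCol a i).getD j 0) else ent a j i := by
  have h := A_invariant a hPre ((a.getD 0 []).length) le_rfl
  rw [A_eq_foldl, PySem.List.pyGetD_zero]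
  exact (h.2.2 j hj i)

theorem A_length (a : List (List Int)) (hPre : Pre_column_even_ascend_odd_descend a) :
    (column_even_ascend_odd_descend a).length = a.length := by
  rw [A_eq_foldl, PySem.List.pyGetD_zero]
  exact (A_invariant a hPre ((a.getD 0 []).length) le_rfl).1

-- ===== characterization of port B =====

-- B-side shapes: the signed value, the decorated triple, a column's block, its sorted block
def sgnv (i : Nat) (v : Int) : Int := if i % 2 ≠ 0 then v else -v

def lexKey (t : Int × Int × Int) : Lex (Int × Lex (Int × Int)) :=
  toLex (t.1, toLex (t.2.1, t.2.2))

def tripOf (a : List (List Int)) (i j : Nat) : Int × Int × Int :=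
  ((i:Int), sgnv i ((a.getD j []).getD i 0), (j:Int))

def blockOf (a : List (List Int)) (i : Nat) : List (Int × Int × Int) :=
  (List.range a.length).map (tripOf a i)

def sblockOf (a : List (List Int)) (i : Nat) : List (Int × Int × Int) :=
  PySem.List.sorted (blockOf a i) lexKey

theorem sgn_cast (i : Nat) (v : Int) :
    (if PySem.Int.mod (i:Int) 2 ≠ 0 then v else -v) = sgnv i v := by
  have h : PySem.Int.mod (i:Int) 2 = ((i % 2 : Nat) : Int) := by
    exact_mod_cast PySem.Int.mod_natCast i 2
  have hiff : (((i % 2 : Nat) : Int) ≠ 0) ↔ (i % 2 ≠ 0) := by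
    constructor <;> intro h' <;> exact_mod_cast h'
  rw [sgnv, h, if_congr hiff rfl rfl]

theorem lexKey_inj : Function.Injective lexKey := by
  rintro ⟨x1, x2, x3⟩ ⟨y1, y2, y3⟩ h
  have h1 := congrArg (fun z => (ofLex z).1) h
  have h2 := congrArg (fun z => (ofLex (ofLex z).2).1) h
  have h3 := congrArg (fun z => (ofLex (ofLex z).2).2) h
  simp only [lexKey] at h1 h2 h3
  exact Prod.ext h1 (Prod.ext h2 h3)

theorem mem_blockOf {a : List (List Int)} {i : Nat} {t : Int × Int × Int}
    (h : t ∈ blockOf a i) : t.1 = (i:Int) := by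
  rw [blockOf, List.mem_map] at h
  obtain ⟨j, -, rfl⟩ := h
  rfl

theorem mem_sblockOf_fst {a : List (List Int)} {i : Nat} {t : Int × Int × Int}
    (h : t ∈ sblockOf a i) : t.1 = (i:Int) :=
  mem_blockOf ((PySem.List.mem_sorted _ _ _ _).mp h)

theorem length_blockOf (a : List (List Int)) (i : Nat) : (blockOf a i).length = a.length := by
  simp [blockOf]

theorem length_sblockOf (a : List (List Int)) (i : Nat) : (sblockOf a i).length = a.length := by
  rw [sblockOf, PySem.List.length_sorted, length_blockOf]

theorem nodup_blockOf (a : List (List Int)) (i : Nat) : (blockOf a i).Nodup := by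
  refine List.Nodup.map ?_ List.nodup_range
  intro x y h
  have := congrArg (fun t => t.2.2) h
  simpa [tripOf] using this

-- within a sorted block the second components are ≤-sorted
theorem sblock_snd_pairwise (a : List (List Int)) (i : Nat) :
    (sblockOf a i).Pairwise (fun s t => s.2.1 ≤ t.2.1) := by
  refine (PySem.List.sorted_pairwise (blockOf a i) lexKey).imp_of_mem ?_
  intro s t hs ht hle
  have hs1 := mem_sblockOf_fst hs
  have ht1 := mem_sblockOf_fst ht
  rw [Prod.Lex.le_iff] at hle
  rcases hle with h | ⟨-, h2⟩
  · exfalso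
    simp only [lexKey, ofLex_toLex] at h
    omega
  · rw [Prod.Lex.le_iff] at h2
    rcases h2 with h | ⟨h, -⟩
    · exact le_of_lt h
    · exact le_of_eq h

-- the sorted flat list is the concatenation of the per-column sorted blocks
theorem flat_sorted (a : List (List Int)) (w : Nat) :
    PySem.List.sorted ((List.range w).flatMap (fun i => blockOf a i)) lexKey
      = (List.range w).flatMap (fun i => sblockOf a i) := by
  refine PySem.List.sorted_eq_of_perm_of_pairwise_lt _ _ lexKey ?_ ?_
  · exact List.Perm.flatMap_left _ (fun i _ => PySem.List.sorted_perm _ _ _)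
  · rw [List.flatMap_def, List.pairwise_flatten]
    constructor
    · intro l hl
      rw [List.mem_map] at hl
      obtain ⟨i, -, rfl⟩ := hl
      have hnd : (sblockOf a i).Nodup :=
        ((PySem.List.sorted_perm (blockOf a i) lexKey false).nodup_iff).mpr (nodup_blockOf a i)
      have hle := PySem.List.sorted_pairwise (blockOf a i) lexKey
      refine (hle.and hnd).imp ?_
      rintro s t ⟨h1, h2⟩
      exact lt_of_le_of_ne h1 (fun he => h2 (lexKey_inj he))
    · rw [List.pairwise_map]
      refine List.pairwise_lt_range.imp ?_
      intro i1 i2 h12 x hx y hy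
      have hx1 := mem_sblockOf_fst hx
      have hy1 := mem_sblockOf_fst hy
      rw [Prod.Lex.lt_iff]
      left
      simp only [lexKey, ofLex_toLex]
      omega

-- the sorted signed block, undecorated, is exactly A's sorted column
theorem sblock_map_val (a : List (List Int)) (i : Nat) :
    (sblockOf a i).map (fun t => sgnv i t.2.1) = sortCol a i := by
  have hperm : (sblockOf a i).Perm (blockOf a i) := PySem.List.sorted_perm _ _ _
  by_cases hp : i % 2 = 0
  · -- even column: sgnv negates; descending sort
    have hsg : ∀ v : Int, sgnv i v = -v := fun v => by simp [sgnv, hp]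
    rw [sortCol, decide_eq_true hp]
    symm
    refine List.Perm.eq_of_pairwise (le := fun x y : Int => y ≤ x)
      (fun x y _ _ h1 h2 => le_antisymm h2 h1) ?_ ?_ ?_
    · exact PySem.List.sorted_pairwise_rev (colOf a i) (fun x => x)
    · rw [List.pairwise_map]
      refine (sblock_snd_pairwise a i).imp ?_
      intro s t h
      rw [hsg, hsg]
      omega
    · -- sorted(colOf) ~ colOf ~ map of sblock
      have h1 : ((sblockOf a i).map (fun t => sgnv i t.2.1)).Perm
          ((blockOf a i).map (fun t => sgnv i t.2.1)) := hperm.map _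
      have h2 : (blockOf a i).map (fun t => sgnv i t.2.1) = colOf a i := by
        rw [blockOf, List.map_map, colOf]
        refine List.map_congr_left (fun j _ => ?_)
        simp [tripOf, hsg, Function.comp]
      exact (PySem.List.sorted_perm (colOf a i) (fun x => x) true).trans (h2 ▸ h1.symm)
  · -- odd column: sgnv is the identity; ascending sort
    have hsg : ∀ v : Int, sgnv i v = v := fun v => by simp [sgnv, hp]
    rw [sortCol, decide_eq_false hp]
    have h2 : (blockOf a i).map (fun t => sgnv i t.2.1) = colOf a i := by
      rw [blockOf, List.map_map, colOf]
      refine List.map_congr_left (fun j _ => ?_)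
      simp [tripOf, hsg, Function.comp]
    refine Eq.symm ?_
    refine PySem.List.sorted_id_eq_of_perm_of_pairwise (κ := Int) (colOf a i)
      ((sblockOf a i).map (fun t => sgnv i t.2.1)) ?_ ?_
    · have hp2 := hperm.map (fun t => sgnv i t.2.1)
      rw [h2] at hp2
      exact hp2
    · rw [List.pairwise_map]
      refine (sblock_snd_pairwise a i).imp ?_
      intro s t h
      rw [hsg, hsg]; exact h

-- indexing a flatten of equal-length blocks
theorem getD_flatMap_blocks {α : Type} (f : Nat → List α) (n : Nat) (d : α) :
    ∀ (w q r : Nat), (∀ i < w, (f i).length = n) → q < w → r < n →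
    ((List.range w).flatMap f).getD (q*n+r) d = (f q).getD r d := by
  intro w
  induction w with
  | zero => intro q r _ hq _; omega
  | succ w ih =>
    intro q r hlen hq hr
    by_cases hqw : q < w
    · rw [List.range_succ, List.flatMap_append]
      rw [List.getD_eq_getElem?_getD, List.getElem?_append_left, ← List.getD_eq_getElem?_getD]
      · exact ih q r (fun i hi => hlen i (by omega)) hqw hr
      · -- q*n+r < length of the first part; blocks have length n
        have hL : ((List.range w).flatMap f).length = w * n := by
          rw [List.length_flatMap]
          have : (List.range w).map (fun i => (f i).length) = (List.range w).map (fun _ => n) := by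
            refine List.map_congr_left (fun i hi => hlen i (by rw [List.mem_range] at hi; omega))
          rw [this, List.map_const', List.sum_replicate, smul_eq_mul, List.length_range]
        rw [hL]
        calc q*n+r < q*n+n := by omega
        _ = (q+1)*n := by ring
        _ ≤ w*n := Nat.mul_le_mul_right n (by omega)
    · have hqw' : q = w := by omega
      subst hqw'
      rw [List.range_succ, List.flatMap_append]
      have hL : ((List.range q).flatMap f).length = q * n := by
        rw [List.length_flatMap]
        have : (List.range q).map (fun i => (f i).length) = (List.range q).map (fun _ => n) := by
          refine List.map_congr_left (fun i hi => hlen i (by rw [List.mem_range] at hi; omega))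
        rw [this, List.map_const', List.sum_replicate, smul_eq_mul, List.length_range]
      rw [List.getD_eq_getElem?_getD, List.getElem?_append_right (by omega), hL]
      simp only [List.flatMap_cons, List.flatMap_nil, List.append_nil]
      have : q * n + r - q * n = r := by omega
      rw [this, ← List.getD_eq_getElem?_getD]

-- q*n+r decomposition is unique for r < n
theorem divmod_unique {n i j q r : Nat} (hj : j < n) (hr : r < n) (h : i*n+j = q*n+r) :
    i = q ∧ j = r := by
  have h1 : (i*n+j) % n = j := by
    rw [Nat.mul_comm, Nat.mul_add_mod]; exact Nat.mod_eq_of_lt hj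
  have h2 : (q*n+r) % n = r := by
    rw [Nat.mul_comm, Nat.mul_add_mod]; exact Nat.mod_eq_of_lt hr
  have hjr : j = r := by rw [← h1, h, h2]
  subst hjr
  have : i * n = q * n := by omega
  have hn : 0 < n := by omega
  exact ⟨Nat.eq_of_mul_eq_mul_right hn this, rfl⟩

-- the value written by B at (row r, column q)
theorem sblock_val (a : List (List Int)) (q r : Nat) (hr : r < a.length) :
    sgnv q (((sblockOf a q).getD r ((0:Int),(0:Int),(0:Int))).2.1) = (sortCol a q).getD r 0 := by
  have hlen : r < (sblockOf a q).length := by rw [length_sblockOf]; exact hr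
  have h1 : ((sblockOf a q).map (fun t => sgnv q t.2.1)).getD r 0 = (sortCol a q).getD r 0 := by
    rw [sblock_map_val]
  have hlen2 : r < ((sblockOf a q).map (fun t => sgnv q t.2.1)).length := by
    simpa using hlen
  rw [← h1, List.getD_eq_getElem?_getD, List.getElem?_eq_getElem hlen,
    List.getD_eq_getElem?_getD, List.getElem?_eq_getElem hlen2, List.getElem_map]
  rfl

-- B's port, rewritten as a plain Nat-indexed fold with the written values precomputed
theorem alt_eq_fold (a : List (List Int)) (hPre : Pre_column_even_ascend_odd_descend a) :
    column_even_ascend_odd_descend_alt a =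
      (List.range ((a.getD 0 []).length * a.length)).foldl
        (fun m k => m.set (k % a.length)
          ((m.getD (k % a.length) []).set (k / a.length)
            ((sortCol a (k / a.length)).getD (k % a.length) 0))) a := by
  have hn : 0 < a.length := List.length_pos_iff.mpr hPre.1
  rw [column_even_ascend_odd_descend_alt]
  rw [PySem.List.pyGetD_zero]
  set n := a.length with hnn
  set w := (a.getD 0 []).length with hww
  -- step 1: the decorated flat list before sorting is the concatenation of the blocks
  have hraw : ((PySem.List.pyRange 0 (w : Int) 1).flatMap (fun i =>
      (PySem.List.pyRange 0 (n : Int) 1).map (fun j =>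
        (i, if PySem.Int.mod i 2 ≠ 0
            then PySem.List.pyGetD (PySem.List.pyGetD a j []) i 0
            else -(PySem.List.pyGetD (PySem.List.pyGetD a j []) i 0), j))))
      = (List.range w).flatMap (fun i => blockOf a i) := by
    rw [flatMap_pyRange_nat]
    refine List.flatMap_congr (fun i _ => ?_)
    rw [map_pyRange_nat]
    refine List.map_congr_left (fun j _ => ?_)
    simp only [PySem.List.pyGetD_natCast]
    rw [sgn_cast]
    rfl
  rw [hraw]
  -- step 2: the sort splits into per-block sorts
  have hflat : PySem.List.sorted ((List.range w).flatMap (fun i => blockOf a i))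
      (fun t : Int × Int × Int => toLex (t.1, toLex (t.2.1, t.2.2)))
      = (List.range w).flatMap (fun i => sblockOf a i) := by
    have : (fun t : Int × Int × Int => toLex (t.1, toLex (t.2.1, t.2.2))) = lexKey := rfl
    rw [this]
    exact flat_sorted a w
  rw [hflat]
  -- step 3: the writeback fold, block lengths and index arithmetic
  have hlenb : ∀ i < w, (sblockOf a i).length = n := fun i _ => length_sblockOf a i
  have hL : ((List.range w).flatMap (fun i => sblockOf a i)).length = w * n := by
    rw [List.length_flatMap]
    have : (List.range w).map (fun i => (sblockOf a i).length)
        = (List.range w).map (fun _ => n) := by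
      refine List.map_congr_left (fun i hi => hlenb i (by rw [List.mem_range] at hi; omega))
    rw [this, List.map_const', List.sum_replicate, smul_eq_mul, List.length_range]
  rw [hL]
  have hwn : w * n = n * w := Nat.mul_comm w n
  rw [show ((w*n : Nat) : Int) = ((w*n : Nat) : Int) from rfl]
  rw [foldl_pyRange_nat]
  rw [hwn]
  refine PySem.List.foldl_congr_mem _ _ _ _ ?_
  intro m k hk
  rw [List.mem_range] at hk
  have hkwn : k < w * n := by omega
  set q := k / n with hqq
  set r := k % n with hrr
  have hdecomp : q * n + r = k := by
    rw [hqq, hrr, Nat.mul_comm]; exact Nat.div_add_mod k n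
  have hqw : q < w := (Nat.div_lt_iff_lt_mul hn).mpr (by omega)
  have hrn : r < n := Nat.mod_lt _ hn
  have hmodk : PySem.Int.mod (k:Int) (n:Int) = ((r:Nat):Int) := by
    exact_mod_cast PySem.Int.mod_natCast k n
  have hget : PySem.List.pyGetD ((List.range w).flatMap (fun i => sblockOf a i)) (k:Int)
      ((0:Int),(0:Int),(0:Int)) = (sblockOf a q).getD r ((0:Int),(0:Int),(0:Int)) := by
    rw [PySem.List.pyGetD_natCast, ← hdecomp]
    exact getD_flatMap_blocks _ n _ w q r hlenb hqw hrn
  simp only [hget, hmodk, PySem.List.pyGetD_natCast, PySem.List.pySetD_natCast]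
  -- the triple's first component is the column index q
  have hfst : ((sblockOf a q).getD r ((0:Int),(0:Int),(0:Int))).1 = ((q:Nat):Int) := by
    have hmem : (sblockOf a q).getD r ((0:Int),(0:Int),(0:Int)) ∈ sblockOf a q := by
      have : r < (sblockOf a q).length := by rw [length_sblockOf]; omega
      rw [List.getD_eq_getElem?_getD, List.getElem?_eq_getElem this]
      exact List.getElem_mem this
    exact mem_sblockOf_fst hmem
  rw [hfst, PySem.List.pySetD_natCast, sgn_cast]
  rw [sblock_val a q r (by omega)]

-- the invariant of B's writeback loop
theorem B_invariant (a : List (List Int)) (hPre : Pre_column_even_ascend_odd_descend a)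
    (K : Nat) (hK : K ≤ (a.getD 0 []).length * a.length) :
    (((List.range K).foldl
        (fun m k => m.set (k % a.length)
          ((m.getD (k % a.length) []).set (k / a.length)
            ((sortCol a (k / a.length)).getD (k % a.length) 0))) a).length = a.length) ∧
    (∀ j : Nat, (((List.range K).foldl
        (fun m k => m.set (k % a.length)
          ((m.getD (k % a.length) []).set (k / a.length)
            ((sortCol a (k / a.length)).getD (k % a.length) 0))) a).getD j []).length
        = (a.getD j []).length) ∧
    (∀ j < a.length, ∀ i : Nat,
      ent ((List.range K).foldl
        (fun m k => m.set (k % a.length)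
          ((m.getD (k % a.length) []).set (k / a.length)
            ((sortCol a (k / a.length)).getD (k % a.length) 0))) a) j i
        = if i * a.length + j < K then some ((sortCol a i).getD j 0) else ent a j i) := by
  have hn : 0 < a.length := List.length_pos_iff.mpr hPre.1
  set n := a.length with hnn
  set w := (a.getD 0 []).length with hww
  induction K with
  | zero => exact ⟨rfl, fun j => rfl, fun j hj i => by simp⟩
  | succ K ih =>
    obtain ⟨ihL, ihR, ihE⟩ := ih (by omega)
    set body := (fun (m : List (List Int)) (k : Nat) => m.set (k % n)
          ((m.getD (k % n) []).set (k / n)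
            ((sortCol a (k / n)).getD (k % n) 0))) with hbody
    set m := (List.range K).foldl body a with hm
    have hstep : (List.range (K+1)).foldl body a = body m K := by
      rw [List.range_succ, List.foldl_append]; rfl
    set q := K / n with hqq
    set r := K % n with hrr
    have hdecomp : q * n + r = K := by rw [hqq, hrr, Nat.mul_comm]; exact Nat.div_add_mod K n
    have hqw : q < w := (Nat.div_lt_iff_lt_mul hn).mpr (by omega)
    have hrn : r < n := Nat.mod_lt _ hn
    have hrowlen : ∀ j, (m.getD j []).length = (a.getD j []).length := ihR
    have hwle : ∀ j < n, w ≤ (a.getD j []).length := by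
      intro j hj
      have hja : a.getD j [] = a[j] := by
        rw [List.getD_eq_getElem?_getD, List.getElem?_eq_getElem hj]; rfl
      have := hPre.2 _ (hja ▸ List.getElem_mem hj)
      rwa [PySem.List.pyGetD_zero] at this
    have hbK : body m K = m.set r ((m.getD r []).set q ((sortCol a q).getD r 0)) := rfl
    refine ⟨?_, ?_, ?_⟩
    · rw [hstep, hbK, List.length_set, ihL]
    · intro j
      rw [hstep, hbK, List.getD_eq_getElem?_getD, List.getElem?_set]
      have hrm : r < m.length := by rw [ihL]; omega
      by_cases hjr : r = j
      · subst hjr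
        have h0 := ihR r
        rw [List.getD_eq_getElem?_getD, List.getElem?_eq_getElem hrm] at h0
        simp only [Option.getD_some] at h0
        simp [hrm, h0]
      · have := ihR j
        rw [List.getD_eq_getElem?_getD] at this
        simp [hjr, this]
    · intro j hj i
      rw [hstep, hbK, ent, List.getD_eq_getElem?_getD, List.getElem?_set]
      have hrm : r < m.length := by rw [ihL]; omega
      by_cases hjr : r = j
      · subst hjr
        rw [if_pos rfl, if_pos hrm]
        simp only [Option.getD_some]
        rw [List.getElem?_set]
        by_cases hiq : q = i
        · subst hiq
          rw [if_pos rfl, if_pos (by rw [hrowlen]; exact lt_of_lt_of_le hqw (hwle r (by omega)))]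
          rw [if_pos (by omega)]
        · rw [if_neg hiq]
          have hE := ihE r (by omega) i
          rw [ent] at hE
          rw [hE]
          have hiff : (i * n + r < K + 1) ↔ (i * n + r < K) := by
            constructor
            · intro h
              rcases Nat.lt_or_ge (i*n+r) K with h' | h'
              · exact h'
              · exfalso
                have heq : i * n + r = K := by omega
                have huni := divmod_unique (n := n) (i := i) (j := r) (q := q) (r := r)
                  hrn hrn (by rw [heq, ← hdecomp])
                exact hiq huni.1.symm
            · omega
          rw [if_congr hiff rfl rfl]
      · rw [if_neg hjr]
        have hE := ihE j hj i
        rw [ent, List.getD_eq_getElem?_getD] at hE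
        rw [hE]
        have hiff : (i * n + j < K + 1) ↔ (i * n + j < K) := by
          constructor
          · intro h
            rcases Nat.lt_or_ge (i*n+j) K with h' | h'
            · exact h'
            · exfalso
              have heq : i * n + j = K := by omega
              have huni := divmod_unique (n := n) (i := i) (j := j) (q := q) (r := r)
                hj hrn (by rw [heq, ← hdecomp])
              exact hjr huni.2.symm
          · omega
        rw [if_congr hiff rfl rfl]

theorem alt_ent (a : List (List Int)) (hPre : Pre_column_even_ascend_odd_descend a)
    (j : Nat) (hj : j < a.length) (i : Nat) :
    ent (column_even_ascend_odd_descend_alt a) j i =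
      if i < (a.getD 0 []).length then some ((sortCol a i).getD j 0) else ent a j i := by
  have h := B_invariant a hPre ((a.getD 0 []).length * a.length) le_rfl
  rw [alt_eq_fold a hPre]
  rw [h.2.2 j hj i]
  have hiff : (i * a.length + j < (a.getD 0 []).length * a.length) ↔ (i < (a.getD 0 []).length) := by
    constructor
    · intro h'
      by_contra hc
      have hc' : (a.getD 0 []).length ≤ i := Nat.le_of_not_lt hc
      have : (a.getD 0 []).length * a.length ≤ i * a.length := Nat.mul_le_mul_right _ hc'
      omega
    · intro h'
      calc i * a.length + j < i * a.length + a.length := by omega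
      _ = (i+1) * a.length := by ring
      _ ≤ (a.getD 0 []).length * a.length := Nat.mul_le_mul_right _ (by omega)
  rw [if_congr hiff rfl rfl]

theorem alt_length (a : List (List Int)) (hPre : Pre_column_even_ascend_odd_descend a) :
    (column_even_ascend_odd_descend_alt a).length = a.length := by
  rw [alt_eq_fold a hPre]
  exact (B_invariant a hPre ((a.getD 0 []).length * a.length) le_rfl).1

-- ===== VERDICT (by name: the statement is the Claim_ definition above) =====
theorem column_even_ascend_odd_descend_spec : Claim_equal_column_even_ascend_odd_descend := by
  intro a _ hPre
  unfold Spec_column_even_ascend_odd_descend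
  apply List.ext_getElem?
  intro j
  by_cases hj : j < a.length
  · have hjA : j < (column_even_ascend_odd_descend a).length := by rw [A_length a hPre]; exact hj
    have hjB : j < (column_even_ascend_odd_descend_alt a).length := by rw [alt_length a hPre]; exact hj
    rw [List.getElem?_eq_getElem hjA, List.getElem?_eq_getElem hjB]
    congr 1
    have hga : (column_even_ascend_odd_descend a)[j] = (column_even_ascend_odd_descend a).getD j [] := by
      rw [List.getD_eq_getElem?_getD, List.getElem?_eq_getElem hjA]; rfl
    have hgb : (column_even_ascend_odd_descend_alt a)[j]
        = (column_even_ascend_odd_descend_alt a).getD j [] := by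
      rw [List.getD_eq_getElem?_getD, List.getElem?_eq_getElem hjB]; rfl
    rw [hga, hgb]
    apply List.ext_getElem?
    intro i
    have hA := A_ent a hPre j hj i
    have hB := alt_ent a hPre j hj i
    rw [ent] at hA hB
    rw [hA, hB]
  · have h1 : (column_even_ascend_odd_descend a).length ≤ j := by rw [A_length a hPre]; omega
    have h2 : (column_even_ascend_odd_descend_alt a).length ≤ j := by rw [alt_length a hPre]; omega
    rw [List.getElem?_eq_none h1, List.getElem?_eq_none h2]
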